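-- pv_equiv track=rewrite | github.com/maulikmadhavi/genai_exp_template | dspy_learn/dspy_video_test.py | binary_list_to_intervals
-- ===== SOURCE A (Python) =====
-- def binary_list_to_intervals(binary_list, chunk_dur: int = 10):
--     intervals = []
--     i = 0
--     while i < len(binary_list):
--         if binary_list[i] == 1:
--             start = i
--             while i + 1 < len(binary_list) and binary_list[i + 1] == 1:
--                 i += 1
--             end = i
--             intervals.append((start * chunk_dur, (end + 1) * chunk_dur))
--         i += 1
--     return intervals
-- ===== SOURCE B (Python) =====
-- def binary_list_to_intervals(binary_list, chunk_dur: int = 10):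
--     n = len(binary_list)
--     ones = [x == 1 for x in binary_list]
--     starts = [i for i in range(n) if ones[i] and (i == 0 or not ones[i - 1])]
--     ends = [i + 1 for i in range(n) if ones[i] and (i + 1 == n or not ones[i + 1])]
--     return [(s * chunk_dur, e * chunk_dur) for s, e in zip(starts, ends)]
-- ===== Notes on version B (the rewrite author's own statement) =====
-- stated objective: alternative
-- what changed: Replaces the run-consuming nested while loops with edge detection: one comprehension collects run starts (a 1 whose predecessor is not 1), one collects run ends (a 1 whose successor is not 1), and the result is their zip scaled by chunk_dur.
import Mathlib
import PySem

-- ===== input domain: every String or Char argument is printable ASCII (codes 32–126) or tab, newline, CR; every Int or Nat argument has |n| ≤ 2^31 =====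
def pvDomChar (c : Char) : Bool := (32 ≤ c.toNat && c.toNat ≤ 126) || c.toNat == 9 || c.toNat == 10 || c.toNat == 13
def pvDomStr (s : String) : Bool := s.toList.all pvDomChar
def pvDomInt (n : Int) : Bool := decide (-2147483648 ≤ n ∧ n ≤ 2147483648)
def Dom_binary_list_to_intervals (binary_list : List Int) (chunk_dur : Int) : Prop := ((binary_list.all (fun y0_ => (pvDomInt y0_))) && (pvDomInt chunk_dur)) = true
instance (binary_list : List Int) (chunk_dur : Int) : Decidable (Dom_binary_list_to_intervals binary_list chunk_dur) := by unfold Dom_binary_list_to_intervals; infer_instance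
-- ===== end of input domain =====

-- B replaces A's run-consuming nested while loops with edge detection (starts/ends of 1-runs collected independently and zipped); alternative decomposition, same O(n) cost.

-- ===== PORT A =====
-- inner while: 'while i + 1 < len(binary_list) and binary_list[i + 1] == 1: i += 1'; returns the final i
def pvInnerA (bl : List Int) (i : Nat) : Nat :=
  if i + 1 < bl.length ∧ bl.getD (i + 1) 0 = 1 then pvInnerA bl (i + 1) else i
termination_by bl.length - i
decreasing_by omega

theorem pvInnerA_ge (bl : List Int) (i : Nat) : i ≤ pvInnerA bl i := by
  fun_induction pvInnerA with
  | case1 i h ih => omega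
  | case2 i h => omega

-- outer while loop of A, with the accumulator 'intervals'
def pvLoopA (bl : List Int) (cd : Int) (i : Nat) (acc : List (Int × Int)) : List (Int × Int) :=
  if i < bl.length then
    if bl.getD i 0 = 1 then
      pvLoopA bl cd (pvInnerA bl i + 1)
        (acc ++ [(((i : Nat) : Int) * cd, ((pvInnerA bl i + 1 : Nat) : Int) * cd)])
    else pvLoopA bl cd (i + 1) acc
  else acc
termination_by bl.length - i
decreasing_by
  · have := pvInnerA_ge bl i; omega
  · omega

def binary_list_to_intervals (binary_list : List Int) (chunk_dur : Int) : List (Int × Int) :=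
  pvLoopA binary_list chunk_dur 0 []

-- ===== PORT B =====
def binary_list_to_intervals_alt (binary_list : List Int) (chunk_dur : Int) : List (Int × Int) :=
  let n := binary_list.length
  let ones := binary_list.map (fun x => x == 1)
  let starts := (List.range n).filter (fun i => ones.getD i false && (i == 0 || !(ones.getD (i - 1) false)))
  let ends := ((List.range n).filter (fun i => ones.getD i false && (i + 1 == n || !(ones.getD (i + 1) false)))).map (· + 1)
  (starts.zip ends).map (fun p : Nat × Nat => ((p.1 : Int) * chunk_dur, (p.2 : Int) * chunk_dur))

-- ===== PRECONDITION & SPEC =====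
def Spec_binary_list_to_intervals (binary_list : List Int) (chunk_dur : Int) (out : List (Int × Int)) : Prop := out = binary_list_to_intervals_alt binary_list chunk_dur
instance (binary_list : List Int) (chunk_dur : Int) (out : List (Int × Int)) : Decidable (Spec_binary_list_to_intervals binary_list chunk_dur out) := by unfold Spec_binary_list_to_intervals; infer_instance

-- ===== CLAIM (what is proved, stated in full; the proofs are below) =====
def Claim_equal_binary_list_to_intervals : Prop := ∀ (binary_list : List Int) (chunk_dur : Int), Dom_binary_list_to_intervals binary_list chunk_dur → Spec_binary_list_to_intervals binary_list chunk_dur (binary_list_to_intervals binary_list chunk_dur)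

-- ===== LEMMAS AND PROOFS =====

theorem pvInnerA_lt (bl : List Int) (i : Nat) (h : i < bl.length) : pvInnerA bl i < bl.length := by
  fun_induction pvInnerA with
  | case1 i h2 ih => exact ih (by omega)
  | case2 i h2 => omega

-- start / end predicates in terms of the original int list
def pS (bl : List Int) (i : Nat) : Bool := (bl.getD i 0 == 1) && (i == 0 || !(bl.getD (i - 1) 0 == 1))
def pE (bl : List Int) (i : Nat) : Bool := (bl.getD i 0 == 1) && (i + 1 == bl.length || !(bl.getD (i + 1) 0 == 1))

theorem pvInnerA_run (bl : List Int) (i : Nat) (hb : bl.getD i 0 = 1) :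
    ∀ k, i ≤ k → k ≤ pvInnerA bl i → bl.getD k 0 = 1 := by
  fun_induction pvInnerA with
  | case1 i h ih =>
    intro k hk1 hk2
    rcases Nat.eq_or_lt_of_le hk1 with h0 | h0
    · exact h0 ▸ hb
    · exact ih h.2 k h0 hk2
  | case2 i h =>
    intro k hk1 hk2
    have : k = i := by omega
    exact this ▸ hb

theorem pvInnerA_stop (bl : List Int) (i : Nat) :
    ¬ (pvInnerA bl i + 1 < bl.length ∧ bl.getD (pvInnerA bl i + 1) 0 = 1) := by
  fun_induction pvInnerA with
  | case1 i h ih => exact ih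
  | case2 i h => exact h

theorem filter_range'_nil {p : Nat → Bool} (s n : Nat)
    (h : ∀ k, s ≤ k → k < s + n → p k = false) :
    (List.range' s n).filter p = [] := by
  rw [List.filter_eq_nil_iff]
  intro a ha
  rw [List.mem_range'_1] at ha
  simp [h a ha.1 ha.2]

theorem loopA_eq (bl : List Int) (cd : Int) :
    ∀ (fuel i : Nat) (acc : List (Int × Int)),
    bl.length - i ≤ fuel →
    (bl.getD i 0 = 1 → (i = 0 ∨ ¬ bl.getD (i - 1) 0 = 1)) →
    pvLoopA bl cd i acc = acc ++
      ((((List.range' i (bl.length - i)).filter (pS bl)).zip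
        (((List.range' i (bl.length - i)).filter (pE bl)).map (· + 1))).map
        (fun p : Nat × Nat => ((p.1 : Int) * cd, (p.2 : Int) * cd))) := by
  intro fuel
  induction fuel with
  | zero =>
    intro i acc hf _
    have hge : ¬ i < bl.length := by omega
    rw [pvLoopA, if_neg hge]
    have h0 : bl.length - i = 0 := by omega
    simp [h0]
  | succ m ih =>
    intro i acc hf H
    rw [pvLoopA]
    by_cases hlt : i < bl.length
    · simp only [if_pos hlt]
      by_cases hone : bl.getD i 0 = 1
      · simp only [if_pos hone]
        set j := pvInnerA bl i with hj
        have hji : i ≤ j := pvInnerA_ge bl i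
        have hjn : j < bl.length := pvInnerA_lt bl i hlt
        have hrun : ∀ k, i ≤ k → k ≤ j → bl.getD k 0 = 1 := pvInnerA_run bl i hone
        have hstop : ¬ (j + 1 < bl.length ∧ bl.getD (j + 1) 0 = 1) := pvInnerA_stop bl i
        have hrun' : ∀ k, i ≤ k → k ≤ j → bl[k]?.getD 0 = 1 := fun k h1 h2 => by
          rw [← List.getD_eq_getElem?_getD]; exact hrun k h1 h2
        -- split the range at j+1
        have hsplit : List.range' i (bl.length - i) =
            List.range' i (j + 1 - i) ++ List.range' (j + 1) (bl.length - (j + 1)) := by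
          have h0 := List.range'_append (s := i) (m := j + 1 - i) (n := bl.length - (j + 1)) (step := 1)
          rw [(by omega : i + 1 * (j + 1 - i) = j + 1),
            (by omega : (j + 1 - i) + (bl.length - (j + 1)) = bl.length - i)] at h0
          exact h0.symm
        -- filter pS on the first chunk is [i]
        have hS1 : (List.range' i (j + 1 - i)).filter (pS bl) = [i] := by
          have h0 := List.range'_append (s := i) (m := 1) (n := j - i) (step := 1)
          rw [(by omega : i + 1 * 1 = i + 1), (by omega : 1 + (j - i) = j + 1 - i)] at h0
          rw [← h0, List.filter_append]
          have hpi : pS bl i = true := by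
            have hone' : bl[i]?.getD 0 = 1 := hrun' i le_rfl hji
            rcases H hone with h | h
            · subst h; simp [pS, hone']
            · rw [List.getD_eq_getElem?_getD] at h
              simp [pS, hone', h]
          have h2 : (List.range' (i + 1) (j - i)).filter (pS bl) = [] := by
            apply filter_range'_nil
            intro k hk1 hk2
            have hk1' : bl[k - 1]?.getD 0 = 1 := hrun' (k - 1) (by omega) (by omega)
            have hbk : bl[k]?.getD 0 = 1 := hrun' k (by omega) (by omega)
            simp only [pS, Bool.and_eq_false_iff, Bool.or_eq_false_iff]
            right
            constructor
            · simp; omega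
            · simp [hk1']
          simp [hpi, h2, List.range'_one]
        -- filter pE on the first chunk is [j]
        have hE1 : (List.range' i (j + 1 - i)).filter (pE bl) = [j] := by
          have h0 := List.range'_append (s := i) (m := j - i) (n := 1) (step := 1)
          rw [(by omega : i + 1 * (j - i) = j), (by omega : (j - i) + 1 = j + 1 - i)] at h0
          rw [← h0, List.filter_append]
          have h2 : (List.range' i (j - i)).filter (pE bl) = [] := by
            apply filter_range'_nil
            intro k hk1 hk2
            have hk1' : bl[k + 1]?.getD 0 = 1 := hrun' (k + 1) (by omega) (by omega)
            have hbk : bl[k]?.getD 0 = 1 := hrun' k (by omega) (by omega)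
            simp only [pE, Bool.and_eq_false_iff, Bool.or_eq_false_iff]
            right
            constructor
            · simp; omega
            · simp [hk1']
          have hpj : pE bl j = true := by
            have hbj : bl[j]?.getD 0 = 1 := hrun' j hji le_rfl
            rcases Nat.lt_or_ge (j + 1) bl.length with h | h
            · have hnb : ¬ bl.getD (j + 1) 0 = 1 := fun hc => hstop ⟨h, hc⟩
              rw [List.getD_eq_getElem?_getD] at hnb
              simp [pE, hbj, hnb]
            · have hq : j + 1 = bl.length := by omega
              simp [pE, hbj, hq]
          simp [hpj, h2, List.range'_one]
        have ihH : bl.getD (j + 1) 0 = 1 → (j + 1 = 0 ∨ ¬ bl.getD (j + 1 - 1) 0 = 1) := by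
          intro hc
          exfalso
          rcases Nat.lt_or_ge (j + 1) bl.length with h | h
          · exact hstop ⟨h, hc⟩
          · rw [List.getD_eq_default _ _ (by omega)] at hc; exact absurd hc (by norm_num)
        rw [ih (j + 1) _ (by omega) ihH, hsplit, List.filter_append, List.filter_append,
          hS1, hE1]
        simp only [List.map_cons, List.zip_cons_cons, List.append_assoc,
          List.cons_append, List.nil_append]
      · simp only [if_neg hone]
        have hstep : List.range' i (bl.length - i) = i :: List.range' (i + 1) (bl.length - (i + 1)) := by
          have h1 : bl.length - i = (bl.length - (i + 1)) + 1 := by omega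
          rw [h1, List.range'_succ]
        have hone' : ¬ bl[i]?.getD 0 = 1 := by
          rw [← List.getD_eq_getElem?_getD]; exact hone
        have hpiS : pS bl i = false := by simp [pS, hone']
        have hpiE : pE bl i = false := by simp [pE, hone']
        have ihH : bl.getD (i + 1) 0 = 1 → (i + 1 = 0 ∨ ¬ bl.getD (i + 1 - 1) 0 = 1) := by
          intro _; right; simpa using hone
        rw [ih (i + 1) acc (by omega) ihH, hstep]
        simp [hpiS, hpiE]
    · simp only [if_neg hlt]
      have : bl.length - i = 0 := by omega
      simp [this]

-- bridge: B's predicate over 'ones' agrees with pS/pE pointwise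
theorem ones_opt (o : Option Int) :
    (Option.map (fun x => x == 1) o).getD false = (o.getD 0 == 1) := by
  cases o <;> simp

-- ===== VERDICT (by name: the statement is the Claim_ definition above) =====
theorem binary_list_to_intervals_spec : Claim_equal_binary_list_to_intervals := by
  intro bl cd _
  unfold Spec_binary_list_to_intervals binary_list_to_intervals binary_list_to_intervals_alt
  have hmain := loopA_eq bl cd bl.length 0 [] (by omega) (by intro _; left; rfl)
  simp only [Nat.sub_zero, ← List.range_eq_range'] at hmain
  rw [hmain, List.nil_append]
  have hS : (List.range bl.length).filter
      (fun i => (bl.map (fun x => x == 1)).getD i false &&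
        (i == 0 || !((bl.map (fun x => x == 1)).getD (i - 1) false))) =
      (List.range bl.length).filter (pS bl) := by
    apply List.filter_congr
    intro k _
    simp [pS, ones_opt]
  have hE : (List.range bl.length).filter
      (fun i => (bl.map (fun x => x == 1)).getD i false &&
        (i + 1 == bl.length || !((bl.map (fun x => x == 1)).getD (i + 1) false))) =
      (List.range bl.length).filter (pE bl) := by
    apply List.filter_congr
    intro k _
    simp [pE, ones_opt]
  simp only [hS, hE]
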